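-- pv_equiv track=rewrite | github.com/OSUpdate/Algorithm | Programmers/2019-kakao-crain.py | solution
-- ===== SOURCE A (Python) =====
-- def solution(board, moves):
--     answer = 0
--     board_arr = []
--     board_res = []
--     size = len(board)
--     for i in range(size):
--         board_arr.append(
--             [board[j][i] for j in range(size) if board[j][i] != 0])
--     for i in moves:
--         if len(board_arr[i - 1]):
--             cur = board_arr[i - 1].pop(0)
--             if board_res and board_res[-1] == cur:
--                 board_res.pop(-1)
--                 answer += 2
--             else:
--                 board_res.append(cur)
--     return answer
-- ===== SOURCE B (Python) =====
-- def solution(board, moves):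
--     grid = [row[:] for row in board]  # copy so the argument is never mutated
--     answer = 0
--     stack = []
--     for m in moves:
--         col = m - 1
--         for row in grid:
--             if row[col] != 0:
--                 doll = row[col]
--                 row[col] = 0
--                 if stack and stack[-1] == doll:
--                     stack.pop()
--                     answer += 2
--                 else:
--                     stack.append(doll)
--                 break
--     return answer
-- ===== Notes on version B (the rewrite author's own statement) =====
-- stated objective: simpler
-- what changed: B drops A's transpose-the-board-into-column-stacks preprocessing and instead, per move, scans the rows of a working copy top-to-bottom for the first non-zero cell in that column and zeroes it in place.
-- outside the precondition, e.g. on solution([[5, 9, 5], [1, 2, 3]], [1, 0]): A returns 0, B returns 2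
import Mathlib
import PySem

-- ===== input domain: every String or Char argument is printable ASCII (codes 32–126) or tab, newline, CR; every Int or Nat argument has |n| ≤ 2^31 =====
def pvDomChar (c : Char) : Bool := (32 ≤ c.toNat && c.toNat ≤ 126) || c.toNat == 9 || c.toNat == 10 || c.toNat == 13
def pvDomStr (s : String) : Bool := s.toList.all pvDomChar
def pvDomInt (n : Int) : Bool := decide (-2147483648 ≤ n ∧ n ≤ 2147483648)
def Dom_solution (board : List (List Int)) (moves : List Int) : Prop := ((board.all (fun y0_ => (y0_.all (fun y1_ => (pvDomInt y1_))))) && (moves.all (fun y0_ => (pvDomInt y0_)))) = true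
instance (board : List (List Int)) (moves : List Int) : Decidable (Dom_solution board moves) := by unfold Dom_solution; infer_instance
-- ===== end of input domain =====

-- B replaces A's transpose-into-column-stacks preprocessing by a per-move top-to-bottom
-- row scan on a working copy of the board (simpler; neither version mutates its argument).


-- ===== PORT A =====
-- board_arr[i] = [board[j][i] for j in range(size) if board[j][i] != 0]
-- board[j][i] would raise on a short row; getD 0 is exact inside Pre_ (rows have ≥ size entries).
def aColumn (board : List (List Int)) (size i : Nat) : List Int :=
  ((List.range size).map (fun j => (board.getD j []).getD i 0)).filter (fun x => x ≠ 0)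

-- one iteration of A's `for i in moves` loop; board_res is kept head = top (Python's list end);
-- board_arr[i-1] / its pop(0) via pyGetD/pySetD (exact inside Pre_, incl. negative wraparound)
def aStep (s : List (List Int) × List Int × Int) (m : Int) : List (List Int) × List Int × Int :=
  let (arr, res, ans) := s
  match PySem.List.pyGetD arr (m - 1) [] with   -- `if len(board_arr[i-1]):`
  | [] => (arr, res, ans)
  | cur :: rest =>                              -- `cur = board_arr[i-1].pop(0)`
    let arr' := PySem.List.pySetD arr (m - 1) rest
    match res with
    | top :: rt =>
      if top = cur then (arr', rt, ans + 2)     -- matched pair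
      else (arr', cur :: top :: rt, ans)        -- push
    | [] => (arr', [cur], ans)                  -- push onto empty result

def solution (board : List (List Int)) (moves : List Int) : Int :=
  let size := board.length
  let board_arr := (List.range size).map (fun i => aColumn board size i)
  (moves.foldl aStep (board_arr, [], 0)).2.2

-- ===== PORT B =====
-- inner `for row in grid: … break`: find the first row whose cell row[col] is non-zero,
-- return its value and the grid with that cell zeroed (none = no such row);
-- row[col] read/write via pyGetD/pySetD (exact inside Pre_, incl. negative wraparound)
def scanPop (rows : List (List Int)) (col : Int) : Option (Int × List (List Int)) :=
  match rows with
  | [] => none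
  | r :: rs =>
    if PySem.List.pyGetD r col 0 ≠ 0 then
      some (PySem.List.pyGetD r col 0, PySem.List.pySetD r col 0 :: rs)
    else match scanPop rs col with
      | none => none
      | some (d, rs') => some (d, r :: rs')

def bStep (s : List (List Int) × List Int × Int) (m : Int) : List (List Int) × List Int × Int :=
  let (grid, stack, ans) := s
  match scanPop grid (m - 1) with
  | none => (grid, stack, ans)
  | some (doll, grid') =>
    match stack with
    | top :: rt =>
      if top = doll then (grid', rt, ans + 2)
      else (grid', doll :: top :: rt, ans)
    | [] => (grid', [doll], ans)

def solution_alt (board : List (List Int)) (moves : List Int) : Int :=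
  let grid := board.map (fun r => r)   -- `[row[:] for row in board]`
  (moves.foldl bStep (grid, [], 0)).2.2

-- ===== PRECONDITION & SPEC =====
-- Pre_ excludes inputs on which A raises IndexError (a row shorter than len(board), or a move
-- outside Python's index range 1-len(board)..len(board)); it also excludes the corner of a
-- ragged board (some row longer than len(board)) combined with a wraparound move ≤ 0, where
-- A's accidental negative indexing into its size-column transpose reads a different column
-- than B's negative indexing into the actual (longer) row.
def Pre_solution (board : List (List Int)) (moves : List Int) : Prop :=
  (∀ r ∈ board, board.length ≤ r.length) ∧
  (∀ m ∈ moves, 1 - (board.length : Int) ≤ m ∧ m ≤ (board.length : Int)) ∧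
  ((∀ m ∈ moves, 1 ≤ m) ∨ (∀ r ∈ board, r.length = board.length))
instance (board : List (List Int)) (moves : List Int) : Decidable (Pre_solution board moves) := by unfold Pre_solution; infer_instance

def pvWitness_solution : List (List Int) × List Int :=
  ([[0, 0, 1], [1, 2, 1], [2, 1, 2]], [1, 3, 3, 2, 2])

def Spec_solution (board : List (List Int)) (moves : List Int) (out : Int) : Prop := out = solution_alt board moves
instance (board : List (List Int)) (moves : List Int) (out : Int) : Decidable (Spec_solution board moves out) := by unfold Spec_solution; infer_instance

-- ===== CLAIM (what is proved, stated in full; the proofs are below) =====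
def Claim_equal_solution : Prop := ∀ (board : List (List Int)) (moves : List Int), Dom_solution board moves → Pre_solution board moves → Spec_solution board moves (solution board moves)

-- ===== LEMMAS AND PROOFS =====

-- Python's normalised index for a valid (possibly negative) index i into a list of length n
def eIdx (n : Nat) (i : Int) : Nat := if 0 ≤ i then i.toNat else n - (-i).toNat

theorem pyIdx?_eq (n : Nat) (i : Int) (h1 : -(n : Int) ≤ i) (h2 : i < n) :
    PySem.List.pyIdx? n i = some (eIdx n i) := by
  unfold PySem.List.pyIdx? eIdx
  by_cases ha : 0 ≤ i
  · rw [if_pos ha, if_pos h2, if_pos ha]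
  · rw [if_neg ha, if_pos h1, if_neg ha]

theorem pyGetD_norm (xs : List Int) (i : Int) (d : Int)
    (h1 : -(xs.length : Int) ≤ i) (h2 : i < xs.length) :
    PySem.List.pyGetD xs i d = xs.getD (eIdx xs.length i) d := by
  unfold PySem.List.pyGetD PySem.List.pyGet?
  rw [pyIdx?_eq xs.length i h1 h2]
  simp [List.getD_eq_getElem?_getD]

theorem pyGetD_norm' (xs : List (List Int)) (i : Int) (d : List Int)
    (h1 : -(xs.length : Int) ≤ i) (h2 : i < xs.length) :
    PySem.List.pyGetD xs i d = xs.getD (eIdx xs.length i) d := by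
  unfold PySem.List.pyGetD PySem.List.pyGet?
  rw [pyIdx?_eq xs.length i h1 h2]
  simp [List.getD_eq_getElem?_getD]

theorem pySetD_norm {α : Type} (xs : List α) (i : Int) (v : α)
    (h1 : -(xs.length : Int) ≤ i) (h2 : i < xs.length) :
    PySem.List.pySetD xs i v = xs.set (eIdx xs.length i) v := by
  unfold PySem.List.pySetD PySem.List.pySet?
  rw [pyIdx?_eq xs.length i h1 h2]
  rfl

-- the dolls still hanging in column c of a grid, top to bottom
def colStack (g : List (List Int)) (c : Nat) : List Int :=
  (g.map (fun r => r.getD c 0)).filter (fun x => x ≠ 0)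

theorem colStack_cons (r : List Int) (rs : List (List Int)) (c : Nat) :
    colStack (r :: rs) c =
      if r.getD c 0 ≠ 0 then r.getD c 0 :: colStack rs c else colStack rs c := by
  by_cases h : r.getD c 0 = 0 <;> rw [List.getD_eq_getElem?_getD] at h <;>
    simp [colStack, h]

theorem getD_set_same (r : List Int) (c : Nat) (hv : r.getD c 0 ≠ 0) :
    (r.set c 0).getD c 0 = 0 := by
  have hlen : c < r.length := by
    by_contra hc
    exact hv (List.getD_eq_default _ _ (by omega))
  simp [List.getD_eq_getElem?_getD, hlen]

theorem getD_set_ne (r : List Int) (c c' : Nat) (h : c' ≠ c) :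
    (r.set c 0).getD c' 0 = r.getD c' 0 := by
  simp [List.getD_eq_getElem?_getD, List.getElem?_set_ne (fun he => h he.symm)]

-- scanPop pops the head of column c's stack and leaves every other column stack
-- and every row length unchanged (col's read/write normalise to index c on each row)
theorem scanPop_spec (g : List (List Int)) (col : Int) (c : Nat)
    (hrow : ∀ r ∈ g, PySem.List.pyGetD r col 0 = r.getD c 0 ∧
                     PySem.List.pySetD r col (0 : Int) = r.set c 0) :
    (scanPop g col = none → colStack g c = []) ∧
    (∀ d g', scanPop g col = some (d, g') →
      colStack g c = d :: colStack g' c ∧ (∀ c', c' ≠ c → colStack g' c' = colStack g c') ∧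
      g'.map List.length = g.map List.length) := by
  induction g with
  | nil => exact ⟨fun _ => rfl, by intro d g' h; simp [scanPop] at h⟩
  | cons r rs ih =>
    obtain ⟨hg, hs⟩ := hrow r (by simp)
    have hrow' : ∀ r' ∈ rs, PySem.List.pyGetD r' col 0 = r'.getD c 0 ∧
        PySem.List.pySetD r' col (0 : Int) = r'.set c 0 := fun r' h' => hrow r' (by simp [h'])
    by_cases hv : r.getD c 0 ≠ 0
    · refine ⟨?_, ?_⟩
      · intro h
        rw [scanPop, hg, if_pos hv] at h
        exact absurd h (by simp)
      · intro d g' h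
        rw [scanPop, hg, hs, if_pos hv] at h
        injection h with h2
        injection h2 with hd hgg
        subst hd hgg
        refine ⟨?_, ?_, ?_⟩
        · rw [colStack_cons, if_pos hv, colStack_cons (r.set c 0),
              if_neg (fun hn => hn (getD_set_same r c hv))]
        · intro c' hc'
          rw [colStack_cons, colStack_cons, getD_set_ne r c c' hc']
        · simp
    · rw [not_not] at hv
      have hcs : colStack (r :: rs) c = colStack rs c := by
        rw [colStack_cons, if_neg (fun hn => hn hv)]
      have hvb : ¬ PySem.List.pyGetD r col 0 ≠ 0 := by rw [hg]; exact fun hn => hn hv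
      refine ⟨?_, ?_⟩
      · intro h
        rw [scanPop, if_neg hvb] at h
        rcases hrec : scanPop rs col with _ | ⟨d, rs'⟩
        · rw [hcs]; exact (ih hrow').1 hrec
        · rw [hrec] at h; exact absurd h (by simp)
      · intro d g' h
        rw [scanPop, if_neg hvb] at h
        rcases hrec : scanPop rs col with _ | ⟨d0, rs0⟩
        · rw [hrec] at h; exact absurd h (by simp)
        · rw [hrec] at h
          injection h with h2
          injection h2 with hd hgg
          subst hd hgg
          obtain ⟨h1, h2, h3⟩ := (ih hrow').2 d0 rs0 hrec
          refine ⟨by rw [hcs, h1, colStack_cons, if_neg (fun hn => hn hv)], ?_, by simp [h3]⟩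
          intro c' hc'
          rw [colStack_cons, colStack_cons, h2 c' hc']

-- (range L).map (getD · d) reproduces the list itself
theorem map_range_getD {a : Type} (l : List a) (d : a) :
    (List.range l.length).map (fun j => l.getD j d) = l := by
  apply List.ext_getElem
  · simp
  · intro i h1 h2
    simp [List.getD_eq_getElem?_getD, List.getElem?_eq_getElem h2]

-- initial relation: A's transposed stacks are the column stacks of the original board
theorem init_rel (board : List (List Int)) :
    (List.range board.length).map (fun i => aColumn board board.length i)
      = (List.range board.length).map (fun i => colStack board i) := by
  apply List.map_congr_left
  intro i _
  unfold aColumn colStack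
  rw [show (List.range board.length).map (fun j => (board.getD j []).getD i 0)
        = board.map (fun r => r.getD i 0) by
      conv_rhs => rw [← map_range_getD board []]
      simp [List.map_map]]

theorem getD_map_range_colStack (L c : Nat) (g : List (List Int)) (hc : c < L) :
    ((List.range L).map (fun i => colStack g i)).getD c [] = colStack g c := by
  rw [List.getD_eq_getElem?_getD]
  simp [List.getElem?_map, List.getElem?_range hc]

theorem set_map_range_colStack (L c : Nat) (g g' : List (List Int)) (hc : c < L)
    (hsame : ∀ c', c' ≠ c → colStack g' c' = colStack g c') :
    ((List.range L).map (fun i => colStack g i)).set c (colStack g' c)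
      = (List.range L).map (fun i => colStack g' i) := by
  apply List.ext_getElem
  · simp
  · intro i hI hI2
    simp only [List.length_map, List.length_range] at hI2
    by_cases hic : i = c
    · subst hic
      simp [List.getElem_set_self]
    · rw [List.getElem_set_ne (fun he => hic he.symm)]
      simp [hsame i hic]

-- one move: A's step on the column-stack image equals B's step, images matched up,
-- and B's step preserves all row lengths
theorem step_rel (L : Nat) (m : Int) (c : Nat) (hc : c < L)
    (hb1 : -(L : Int) ≤ m - 1) (hb2 : m - 1 < L) (hcL : eIdx L (m - 1) = c)
    (g : List (List Int)) (res : List Int) (ans : Int)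
    (hrow : ∀ r ∈ g, PySem.List.pyGetD r (m - 1) 0 = r.getD c 0 ∧
                     PySem.List.pySetD r (m - 1) (0 : Int) = r.set c 0) :
    aStep ((List.range L).map (fun i => colStack g i), res, ans) m
      = ((List.range L).map (fun i => colStack (bStep (g, res, ans) m).1 i),
         (bStep (g, res, ans) m).2)
    ∧ (bStep (g, res, ans) m).1.map List.length = g.map List.length := by
  have harr_len : ((List.range L).map (fun i => colStack g i)).length = L := by simp
  have hgetA : PySem.List.pyGetD ((List.range L).map (fun i => colStack g i)) (m - 1) []
      = colStack g c := by
    rw [pyGetD_norm' _ _ _ (by rw [harr_len]; exact hb1) (by rw [harr_len]; exact_mod_cast hb2),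
        harr_len, hcL]
    exact getD_map_range_colStack L c g hc
  have hsetA : ∀ x, PySem.List.pySetD ((List.range L).map (fun i => colStack g i)) (m - 1) x
      = ((List.range L).map (fun i => colStack g i)).set c x := by
    intro x
    rw [pySetD_norm _ _ _ (by rw [harr_len]; exact hb1) (by rw [harr_len]; exact_mod_cast hb2),
        harr_len, hcL]
  simp only [aStep, bStep, hgetA, hsetA]
  rcases hscan : scanPop g (m - 1) with _ | ⟨d, g'⟩
  · rw [(scanPop_spec g (m - 1) c hrow).1 hscan]
    exact ⟨rfl, rfl⟩
  · obtain ⟨hcol, hoth, hlen⟩ := (scanPop_spec g (m - 1) c hrow).2 d g' hscan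
    rw [hcol]
    have hset := set_map_range_colStack L c g g' hc hoth
    cases res with
    | nil => exact ⟨by simpa using hset, by simpa using hlen⟩
    | cons top rt =>
      by_cases ht : top = d
      · exact ⟨by simpa [ht] using hset, by simpa [ht] using hlen⟩
      · exact ⟨by simpa [ht] using hset, by simpa [ht] using hlen⟩

-- lengths-only facts transfer along a map-length equality
theorem lengths_pred (g g' : List (List Int)) (p : Nat → Prop)
    (hl : g'.map List.length = g.map List.length) (hp : ∀ r ∈ g, p r.length) :
    ∀ r ∈ g', p r.length := by
  intro r hr
  have : r.length ∈ g.map List.length := hl ▸ List.mem_map_of_mem hr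
  obtain ⟨r0, hr0, he⟩ := List.mem_map.1 this
  exact he ▸ hp r0 hr0

theorem loop_rel (moves : List Int) (L : Nat) :
    ∀ (g : List (List Int)) (res : List Int) (ans : Int),
    (∀ m ∈ moves, 1 - (L : Int) ≤ m ∧ m ≤ (L : Int)) →
    (∀ r ∈ g, L ≤ r.length) →
    ((∀ m ∈ moves, 1 ≤ m) ∨ (∀ r ∈ g, r.length = L)) →
    (moves.foldl aStep ((List.range L).map (fun i => colStack g i), res, ans)).2
      = (moves.foldl bStep (g, res, ans)).2 := by
  induction moves with
  | nil => intro g res ans _ _ _; rfl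
  | cons m ms ih =>
    intro g res ans hm hI hsq
    obtain ⟨h1, h2⟩ := hm m (by simp)
    have hms : ∀ m' ∈ ms, 1 - (L : Int) ≤ m' ∧ m' ≤ (L : Int) := fun m' h => hm m' (by simp [h])
    set c := eIdx L (m - 1) with hcdef
    have hc : c < L := by
      rw [hcdef]; unfold eIdx; split_ifs <;> omega
    have hrow : ∀ r ∈ g, PySem.List.pyGetD r (m - 1) 0 = r.getD c 0 ∧
        PySem.List.pySetD r (m - 1) (0 : Int) = r.set c 0 := by
      intro r hr
      have hLr : L ≤ r.length := hI r hr
      have hre : eIdx r.length (m - 1) = c := by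
        rcases hsq with hpos | hsqr
        · have : 1 ≤ m := (hpos m (by simp))
          rw [hcdef]; unfold eIdx
          rw [if_pos (by omega), if_pos (by omega)]
        · rw [hsqr r hr, hcdef]
      constructor
      · rw [pyGetD_norm r _ _ (by omega) (by omega), hre]
      · rw [pySetD_norm r _ _ (by omega) (by omega), hre]
    obtain ⟨hstep, hlen⟩ := step_rel L m c hc (by omega) (by omega) rfl g res ans hrow
    rw [List.foldl_cons, List.foldl_cons, hstep]
    rcases hs : bStep (g, res, ans) m with ⟨g', res', ans'⟩
    rw [hs] at hlen
    have hI' : ∀ r ∈ g', L ≤ r.length := lengths_pred g g' (fun l => L ≤ l) hlen hI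
    have hsq' : (∀ m' ∈ ms, 1 ≤ m') ∨ (∀ r ∈ g', r.length = L) := by
      rcases hsq with hpos | hsqr
      · exact Or.inl (fun m' h => hpos m' (by simp [h]))
      · exact Or.inr (lengths_pred g g' (fun l => l = L) hlen hsqr)
    simpa [hs] using ih g' res' ans' hms hI' hsq'

-- ===== VERDICT (by name: the statement is the Claim_ definition above) =====
theorem solution_spec : Claim_equal_solution := by
  intro board moves _ hpre
  obtain ⟨hr, hm, hsq⟩ := hpre
  show solution board moves = solution_alt board moves
  unfold solution solution_alt
  dsimp only
  rw [init_rel board]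
  have h := loop_rel moves board.length board [] 0 hm hr hsq
  simpa using congrArg Prod.snd h
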